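-- pv_equiv track=rewrite | github.com/yeenpasin/test_data_generator | Backend/generators/personalData_generate/generate_name.py | adjust_name_lengthMax
-- ===== SOURCE A (Python) =====
-- def adjust_name_lengthMax(name, name_lengthMax):
--     if not name_lengthMax:
--         return name
--
--     result = []
--     count = 0
--     for char in name:
--         if char != " ":
--             count += 1
--         if count > name_lengthMax:
--             break
--         result.append(char)
--
--     return ''.join(result)
-- ===== SOURCE B (Python) =====
-- def adjust_name_lengthMax(name, name_lengthMax):
--     if not name_lengthMax:
--         return name
--     prefix = []
--     total = 0
--     for c in name:
--         total += (c != " ")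
--         prefix.append(total)
--     cut = next((i for i, t in enumerate(prefix) if t > name_lengthMax), len(name))
--     return name[:cut]
-- ===== Notes on version B (the rewrite author's own statement) =====
-- stated objective: alternative
-- what changed: B replaces A's char-by-char accumulate-and-break loop with a build-table-then-search decomposition: it materializes the running non-space prefix counts, finds the first index where the count exceeds the limit, and returns a single slice name[:cut].
import Mathlib
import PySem

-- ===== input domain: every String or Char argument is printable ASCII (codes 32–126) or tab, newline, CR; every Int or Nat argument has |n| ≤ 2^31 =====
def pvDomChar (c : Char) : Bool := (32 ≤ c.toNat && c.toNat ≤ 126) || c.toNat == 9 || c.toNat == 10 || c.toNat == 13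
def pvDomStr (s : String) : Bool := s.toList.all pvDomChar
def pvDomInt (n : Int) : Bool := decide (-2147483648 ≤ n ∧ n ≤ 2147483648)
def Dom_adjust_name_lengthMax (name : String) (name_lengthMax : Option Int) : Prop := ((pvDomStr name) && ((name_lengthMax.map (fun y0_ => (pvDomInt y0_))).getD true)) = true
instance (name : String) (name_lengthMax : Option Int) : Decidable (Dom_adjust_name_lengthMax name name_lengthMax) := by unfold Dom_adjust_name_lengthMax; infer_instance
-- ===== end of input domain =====

-- B rewrites A's accumulate-and-break loop as build-prefix-count-table, search for the cutoff, then one slice (objective: alternative decomposition, same cost).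
-- ===== PORT A =====
def pvALoop (m : Int) (count : Int) : List Char → List Char
  | [] => []
  | c :: rest =>
    let count' := if c ≠ ' ' then count + 1 else count
    if count' > m then [] else c :: pvALoop m count' rest

def adjust_name_lengthMax (name : String) (name_lengthMax : Option Int) : String :=
  match name_lengthMax with
  | none => name
  | some m =>
    if m = 0 then name
    else String.ofList (pvALoop m 0 name.toList)

-- ===== PORT B =====
def pvPrefix (total : Int) : List Char → List Int
  | [] => []
  | c :: rest =>
    let total' := total + (if c ≠ ' ' then 1 else 0)
    total' :: pvPrefix total' rest

def adjust_name_lengthMax_alt (name : String) (name_lengthMax : Option Int) : String :=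
  match name_lengthMax with
  | none => name
  | some m =>
    if m = 0 then name
    else
      let pre := pvPrefix 0 name.toList
      let cut : Int :=
        match (PySem.List.enumerate pre 0).find? (fun p => decide (p.2 > m)) with
        | some p => p.1
        | none => (name.toList.length : Int)
      PySem.Str.slice name none (some cut)

-- ===== PRECONDITION & SPEC =====
def Spec_adjust_name_lengthMax (name : String) (name_lengthMax : Option Int) (out : String) : Prop := out = adjust_name_lengthMax_alt name name_lengthMax
instance (name : String) (name_lengthMax : Option Int) (out : String) : Decidable (Spec_adjust_name_lengthMax name name_lengthMax out) := by unfold Spec_adjust_name_lengthMax; infer_instance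

-- ===== CLAIM (what is proved, stated in full; the proofs are below) =====
def Claim_equal_adjust_name_lengthMax : Prop := ∀ (name : String) (name_lengthMax : Option Int), Dom_adjust_name_lengthMax name name_lengthMax → Spec_adjust_name_lengthMax name name_lengthMax (adjust_name_lengthMax name name_lengthMax)

-- ===== LEMMAS AND PROOFS =====

-- the index B computes, expressed with findIdx? on the prefix table
lemma pv_enum_find (m : Int) : ∀ (xs : List Int) (s : Nat),
    ((PySem.List.enumerate xs (s : Int)).find? (fun p => decide (p.2 > m))).map (·.1)
      = (xs.findIdx? (fun t => decide (t > m))).map (fun i => ((s + i : Nat) : Int)) := by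
  intro xs
  induction xs with
  | nil => intro s; simp [PySem.List.enumerate]
  | cons x rest ih =>
    intro s
    rw [PySem.List.enumerate_cons]
    by_cases hx : x > m
    · simp [List.find?, List.findIdx?_cons, hx]
    · have hs1 : ((s : Int) + 1) = ((s + 1 : Nat) : Int) := by norm_num
      simp only [List.find?, hx, decide_false, List.findIdx?_cons, hs1, ih (s + 1)]
      cases rest.findIdx? (fun t => decide (t > m)) with
      | none => simp
      | some i => simp; ring

-- A's loop takes exactly up to the first prefix count that exceeds the limit
lemma pv_loop_take (m : Int) : ∀ (cs : List Char) (count : Int),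
    pvALoop m count cs
      = cs.take (match (pvPrefix count cs).findIdx? (fun t => decide (t > m)) with
                 | some i => i
                 | none => cs.length) := by
  intro cs
  induction cs with
  | nil => intro count; simp [pvALoop, pvPrefix]
  | cons c rest ih =>
    intro count
    by_cases hsp : c = ' '
    · have hA : pvALoop m count (c :: rest)
          = if count > m then [] else c :: pvALoop m count rest := by
        simp [pvALoop, hsp]
      have hP : pvPrefix count (c :: rest) = count :: pvPrefix count rest := by
        simp [pvPrefix, hsp]
      rw [hA, hP, List.findIdx?_cons]
      by_cases h : count > m
      · rw [if_pos h, if_pos (by simp [h])]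
        rfl
      · rw [if_neg h, if_neg (by simp [h]), ih]
        cases (pvPrefix count rest).findIdx? (fun t => decide (t > m)) <;> simp
    · have hA : pvALoop m count (c :: rest)
          = if count + 1 > m then [] else c :: pvALoop m (count + 1) rest := by
        simp [pvALoop, hsp]
      have hP : pvPrefix count (c :: rest) = (count + 1) :: pvPrefix (count + 1) rest := by
        simp [pvPrefix, hsp]
      rw [hA, hP, List.findIdx?_cons]
      by_cases h : count + 1 > m
      · rw [if_pos h, if_pos (by simp [h])]
        rfl
      · rw [if_neg h, if_neg (by simp [h]), ih]
        cases (pvPrefix (count + 1) rest).findIdx? (fun t => decide (t > m)) <;> simp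

-- ===== VERDICT (by name: the statement is the Claim_ definition above) =====
theorem adjust_name_lengthMax_spec : Claim_equal_adjust_name_lengthMax := by
  intro name nlm _
  unfold Spec_adjust_name_lengthMax adjust_name_lengthMax adjust_name_lengthMax_alt
  cases nlm with
  | none => rfl
  | some m =>
    by_cases hm : m = 0
    · simp [hm]
    · simp only [hm, if_false]
      have hfind := pv_enum_find m (pvPrefix 0 name.toList) 0
      simp only [Nat.cast_zero, Nat.zero_add] at hfind
      apply String.toList_inj.mp
      rw [pv_loop_take m name.toList 0]
      simp only [String.toList_ofList, PySem.Str.toList_slice, PySem.Chars.slice_eq_listSlice]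
      cases hcase : (PySem.List.enumerate (pvPrefix 0 name.toList) 0).find? (fun p => decide (p.2 > m)) with
      | none =>
        rw [hcase] at hfind
        simp only [Option.map_none] at hfind
        cases hidx : (pvPrefix 0 name.toList).findIdx? (fun t => decide (t > m)) with
        | none =>
          rw [PySem.List.slice_to_natCast name.toList name.toList.length]
        | some i => rw [hidx] at hfind; simp at hfind
      | some p =>
        rw [hcase] at hfind
        cases hidx : (pvPrefix 0 name.toList).findIdx? (fun t => decide (t > m)) with
        | none => rw [hidx] at hfind; simp at hfind
        | some i =>
          rw [hidx] at hfind
          simp only [Option.map_some, Option.some_inj] at hfind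
          simp only [hfind]
          rw [PySem.List.slice_to_natCast name.toList i]
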